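-- pv_equiv track=rewrite | github.com/FuegoFro/GitChildBranchHelpers | src/subcommands/print_child_branch_structure.py | sorted_look_ahead
-- ===== SOURCE A (Python) =====
-- from typing import Iterable, List, Text, Tuple
--
-- def sorted_look_ahead(iterable: Iterable[str]) -> Iterable[Tuple[str, bool]]:
--     it = iter(sorted(iterable))
--
--     try:
--         last = next(it)
--     except StopIteration:
--         return
--
--     for val in it:
--         yield last, False
--         last = val
--     yield last, True
-- ===== SOURCE B (Python) =====
-- def sorted_look_ahead(iterable):
--     # Sort DESCENDING, flag the first element of that pass (the overall last),
--     # building the output back-to-front, then emit it reversed.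
--     out = []
--     for val in sorted(iterable, reverse=True):
--         out.append((val, not out))
--     yield from reversed(out)
-- ===== Notes on version B (the rewrite author's own statement) =====
-- stated objective: alternative
-- what changed: Replaces A's ascending sort plus one-element look-ahead buffer (try/except StopIteration) by a descending sort whose FIRST element is flagged as last, building the flagged output back-to-front and emitting it reversed.
import Mathlib
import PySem

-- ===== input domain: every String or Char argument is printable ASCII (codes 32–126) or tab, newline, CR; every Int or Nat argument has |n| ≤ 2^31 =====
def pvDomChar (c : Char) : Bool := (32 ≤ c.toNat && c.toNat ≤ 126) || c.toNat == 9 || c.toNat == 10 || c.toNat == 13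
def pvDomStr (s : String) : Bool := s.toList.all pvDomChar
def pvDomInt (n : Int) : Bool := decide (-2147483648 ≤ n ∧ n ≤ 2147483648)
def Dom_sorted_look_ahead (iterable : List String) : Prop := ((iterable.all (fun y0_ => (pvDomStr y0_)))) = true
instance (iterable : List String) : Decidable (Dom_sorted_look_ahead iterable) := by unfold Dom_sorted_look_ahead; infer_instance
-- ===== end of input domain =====

-- B replaces A's ascending sort + one-element look-ahead buffer (try/except StopIteration)
-- by a descending sort whose first element is flagged as last, building the output
-- back-to-front and emitting it reversed: an alternative decomposition, same cost.


-- ===== PORT A =====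
-- Port of A: ascending sort, then yield with a one-element look-ahead buffer (`last`)
def slaLoop (last : String) : List String → List (String × Bool)
  | [] => [(last, true)]
  | v :: rest => (last, false) :: slaLoop v rest

def sorted_look_ahead (iterable : List String) : List (String × Bool) :=
  match PySem.List.sorted iterable id with
  | [] => []
  | h :: t => slaLoop h t

-- ===== PORT B =====
-- Port of B: descending sort; append (val, not out) for each val; emit reversed(out)
def sorted_look_ahead_alt (iterable : List String) : List (String × Bool) :=
  ((PySem.List.sorted iterable id true).foldl
      (fun out val => out ++ [(val, out.isEmpty)]) []).reverse

-- ===== PRECONDITION & SPEC =====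
def Spec_sorted_look_ahead (iterable : List String) (out : List (String × Bool)) : Prop := out = sorted_look_ahead_alt iterable
instance (iterable : List String) (out : List (String × Bool)) : Decidable (Spec_sorted_look_ahead iterable out) := by unfold Spec_sorted_look_ahead; infer_instance

-- ===== CLAIM (what is proved, stated in full; the proofs are below) =====
def Claim_equal_sorted_look_ahead : Prop := ∀ (iterable : List String), Dom_sorted_look_ahead iterable → Spec_sorted_look_ahead iterable (sorted_look_ahead iterable)

-- ===== LEMMAS AND PROOFS =====

-- A's loop yields every element but the last with False and the last with True.
theorem slaLoop_eq (last : String) (t : List String) :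
    slaLoop last t =
      (last :: t).dropLast.map (fun v => (v, false)) ++
        [((last :: t).getLast (by simp), true)] := by
  induction t generalizing last with
  | nil => simp [slaLoop]
  | cons v rest ih => simp [slaLoop, ih v, List.getLast]

-- B's accumulator, once nonempty, only appends False-flagged pairs.
theorem slaFoldl_ne_nil (l : List String) (acc : List (String × Bool)) (h : acc ≠ []) :
    l.foldl (fun out val => out ++ [(val, out.isEmpty)]) acc =
      acc ++ l.map (fun v => (v, false)) := by
  induction l generalizing acc with
  | nil => simp
  | cons v rest ih =>
      have : acc.isEmpty = false := by simpa [List.isEmpty_iff] using h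
      simp only [List.foldl_cons, this]
      rw [ih (acc ++ [(v, false)]) (by simp)]
      simp

-- Descending stable sort with the identity key is the reverse of the ascending one.
theorem sorted_rev_eq_reverse (xs : List String) :
    PySem.List.sorted xs id true = (PySem.List.sorted xs id false).reverse := by
  apply List.Perm.eq_of_pairwise (le := fun a b : String => b ≤ a)
  · exact fun a b _ _ h1 h2 => le_antisymm h2 h1
  · simpa using PySem.List.sorted_pairwise_rev xs id
  · rw [List.pairwise_reverse]
    simpa [flip] using PySem.List.sorted_pairwise xs id
  · exact (PySem.List.sorted_perm xs id true).trans
      ((List.reverse_perm _).trans (PySem.List.sorted_perm xs id false)).symm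

-- ===== VERDICT (by name: the statement is the Claim_ definition above) =====
theorem sorted_look_ahead_spec : Claim_equal_sorted_look_ahead := by
  intro iterable _
  unfold Spec_sorted_look_ahead sorted_look_ahead sorted_look_ahead_alt
  rw [sorted_rev_eq_reverse]
  cases hs : PySem.List.sorted iterable id false with
  | nil => simp
  | cons h t =>
      simp only
      cases hr : (h :: t).reverse with
      | nil => simp at hr
      | cons x rest =>
          have hback : h :: t = rest.reverse ++ [x] := by
            have := congrArg List.reverse hr
            simpa using this
          simp only [List.foldl_cons, List.isEmpty_nil, List.nil_append]
          rw [slaFoldl_ne_nil rest [(x, true)] (by simp)]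
          rw [slaLoop_eq]
          have hdrop : (h :: t).dropLast = rest.reverse := by
            rw [hback]; simp
          have hlast : (h :: t).getLast (by simp) = x := by
            rw [show (h :: t).getLast (by simp) = ((h:String) :: t).getLast (by simp) from rfl]
            simp [hback]
          rw [hdrop, hlast]
          simp
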